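-- pv_equiv track=rewrite | github.com/asotonet/netclaw-mikrotik | scripts/add-skill-licenses.py | add_license_field
-- ===== SOURCE A (Python) =====
-- def add_license_field(frontmatter: str, license_id: str) -> str:
--     """Add license field after version line in frontmatter."""
--     lines = frontmatter.split("\n")
--     new_lines = []
--     license_added = False
--
--     for line in lines:
--         new_lines.append(line)
--         # Add license after version line
--         if line.startswith("version:") and not license_added:
--             new_lines.append(f"license: {license_id}")
--             license_added = True
--
--     # If no version line found, add license after description
--     if not license_added:
--         new_lines = []
--         for line in lines:
--             new_lines.append(line)
--             if line.startswith("description:") and not license_added: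
--                 new_lines.append(f"license: {license_id}")
--                 license_added = True
--
--     # Last resort: add at end of frontmatter
--     if not license_added:
--         new_lines.append(f"license: {license_id}")
--
--     return "\n".join(new_lines)
-- ===== SOURCE B (Python) =====
-- def add_license_field(frontmatter: str, license_id: str) -> str:
--     """Add license field after version line in frontmatter."""
--     lic = f"license: {license_id}"
--     # String-level splice: no line list is ever built.  A "key" line starts either
--     # at position 0 or right after a "\n"; insert "\n" + lic before the newline
--     # that terminates that line (or append if it is the last line).
--     for key in ("version:", "description:"):
--         if frontmatter.startswith(key):
--             pos = 0
--         else: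
--             j = frontmatter.find("\n" + key)
--             if j < 0:
--                 continue
--             pos = j + 1
--         nl = frontmatter.find("\n", pos)
--         if nl < 0:
--             return frontmatter + "\n" + lic
--         return frontmatter[:nl] + "\n" + lic + frontmatter[nl:]
--     return frontmatter + "\n" + lic
-- ===== Notes on version B (the rewrite author's own statement) =====
-- stated objective: alternative
-- what changed: B never builds a line list: it locates the 'version:' (else 'description:') line start directly in the raw string via startswith/find of '\n'+key, finds the terminating newline with find('\n', pos), and splices the license line in with one string slice (appending when no newline follows), instead of A's split-into-lines flagged rebuild loops plus join.
import Mathlib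
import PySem

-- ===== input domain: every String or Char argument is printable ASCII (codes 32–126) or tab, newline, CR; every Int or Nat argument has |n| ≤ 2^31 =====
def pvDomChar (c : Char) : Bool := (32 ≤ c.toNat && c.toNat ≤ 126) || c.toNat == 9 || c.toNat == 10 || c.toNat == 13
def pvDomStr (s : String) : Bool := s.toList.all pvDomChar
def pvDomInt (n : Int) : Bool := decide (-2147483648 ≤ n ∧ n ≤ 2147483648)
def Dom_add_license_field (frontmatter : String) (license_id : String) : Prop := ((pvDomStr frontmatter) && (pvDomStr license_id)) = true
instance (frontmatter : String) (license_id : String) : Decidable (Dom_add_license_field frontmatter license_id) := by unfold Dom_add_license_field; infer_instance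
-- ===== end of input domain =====

-- B splices the license line into the raw frontmatter string via startswith/find (no line list is built), replacing A's split/flagged-rebuild/join; return values proved equal on all inputs.


-- Both ports work on List Char (PySem.Chars is the definitional layer of PySem.Str); String.ofList wraps the result.

-- ===== PORT A =====
-- the for-loop with the license_added flag, threading (new_lines, flag)
def pvPass (pref lic : List Char) : List (List Char) → Bool → List (List Char) × Bool
  | [], added => ([], added)
  | l :: ls, added =>
    if PySem.Chars.startswith l pref && !added then
      let r := pvPass pref lic ls true
      (l :: lic :: r.1, r.2)
    else
      let r := pvPass pref lic ls added
      (l :: r.1, r.2)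

def pvAddA (cs lic : List Char) : List Char :=
  let lines := (PySem.Chars.split? cs ['\n']).getD []  -- sep "\n" nonempty: split? is always some
  let p1 := pvPass "version:".toList lic lines false
  if p1.2 then PySem.Chars.join ['\n'] p1.1
  else
    let p2 := pvPass "description:".toList lic lines false
    if p2.2 then PySem.Chars.join ['\n'] p2.1
    else PySem.Chars.join ['\n'] (p2.1 ++ [lic])

def add_license_field (frontmatter : String) (license_id : String) : String :=
  String.ofList (pvAddA frontmatter.toList ("license: ".toList ++ license_id.toList))

-- ===== PORT B =====
-- one iteration of B's for-loop over the two keys: returns some result or none ("continue")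
def pvTry (cs key lic : List Char) : Option (List Char) :=
  let pos? : Option Int :=
    if PySem.Chars.startswith cs key then some 0
    else
      let j := PySem.Chars.find cs ('\n' :: key)
      if j < 0 then none else some (j + 1)
  match pos? with
  | none => none
  | some pos =>
    let nl := PySem.Chars.findFrom cs ['\n'] pos
    if nl < 0 then some (cs ++ '\n' :: lic)
    else some (PySem.Chars.slice cs none (some nl) ++ '\n' :: lic ++ PySem.Chars.slice cs (some nl) none)

def pvAddB (cs lic : List Char) : List Char :=
  match pvTry cs "version:".toList lic with
  | some r => r
  | none =>
    match pvTry cs "description:".toList lic with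
    | some r => r
    | none => cs ++ '\n' :: lic

def add_license_field_alt (frontmatter : String) (license_id : String) : String :=
  String.ofList (pvAddB frontmatter.toList ("license: ".toList ++ license_id.toList))

-- ===== PRECONDITION & SPEC =====
def Spec_add_license_field (frontmatter : String) (license_id : String) (out : String) : Prop := out = add_license_field_alt frontmatter license_id
instance (frontmatter : String) (license_id : String) (out : String) : Decidable (Spec_add_license_field frontmatter license_id out) := by unfold Spec_add_license_field; infer_instance

-- ===== CLAIM (what is proved, stated in full; the proofs are below) =====
def Claim_equal_add_license_field : Prop := ∀ (frontmatter : String) (license_id : String), Dom_add_license_field frontmatter license_id → Spec_add_license_field frontmatter license_id (add_license_field frontmatter license_id)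

-- ===== LEMMAS AND PROOFS =====

-- small intercalate equations (cited Mathlib has none for cons shapes)
theorem pv_intercalate_nil (c : Char) : [c].intercalate ([] : List (List Char)) = [] := by
  simp [List.intercalate]

theorem pv_intercalate_singleton (c : Char) (a : List Char) : [c].intercalate [a] = a := by
  simp [List.intercalate]

theorem pv_intercalate_cons₂ (c : Char) (a b : List Char) (t : List (List Char)) :
    [c].intercalate (a :: b :: t) = a ++ c :: [c].intercalate (b :: t) := by
  simp [List.intercalate, List.intersperse_cons₂]

-- PySem.Chars.splitOn with a one-char separator is Mathlib's List.splitOn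
theorem pv_go_spec (c : Char) (fuel : Nat) :
    ∀ (l cur : List Char) (acc : List (List Char)), l.length ≤ fuel →
    PySem.Chars.splitOn.go [c] fuel l cur acc
      = acc.reverse ++ (l.splitOn c).modifyHead (fun y => cur.reverse ++ y) := by
  induction fuel with
  | zero =>
    intro l cur acc h
    have hl : l = [] := by cases l <;> simp_all
    subst hl
    simp [PySem.Chars.splitOn.go, List.splitOn]
  | succ fuel ih =>
    intro l cur acc h
    cases l with
    | nil => simp [PySem.Chars.splitOn.go, List.splitOn]
    | cons x rest =>
      by_cases hx : x = c
      · subst hx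
        have hpre : List.isPrefixOf [x] (x :: rest) = true := by simp [List.isPrefixOf]
        rw [show PySem.Chars.splitOn.go [x] (fuel+1) (x :: rest) cur acc
              = PySem.Chars.splitOn.go [x] fuel rest [] (cur.reverse :: acc) by
            simp [PySem.Chars.splitOn.go, hpre]]
        rw [ih rest [] (cur.reverse :: acc) (by simpa using Nat.lt_succ_iff.mp (by simpa using h))]
        simp only [List.splitOn, List.splitOnP_cons, beq_self_eq_true, if_true]
        rcases hsp : List.splitOnP (· == x) rest with - | ⟨h0, t0⟩
        · exact absurd hsp (List.splitOnP_ne_nil _ _)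
        · simp [List.modifyHead]
      · have hpre : List.isPrefixOf [c] (x :: rest) = false := by
          simp [List.isPrefixOf]
          exact fun hcx => absurd hcx.symm hx
        rw [show PySem.Chars.splitOn.go [c] (fuel+1) (x :: rest) cur acc
              = PySem.Chars.splitOn.go [c] fuel rest (x :: cur) acc by
            simp [PySem.Chars.splitOn.go, hpre]]
        rw [ih rest (x :: cur) acc (by simpa using Nat.lt_succ_iff.mp (by simpa using h))]
        simp only [List.splitOn, List.splitOnP_cons]
        have hbeq : (x == c) = false := by simpa using hx
        rw [hbeq]
        rcases hsp : List.splitOnP (· == c) rest with - | ⟨h0, t0⟩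
        · exact absurd hsp (List.splitOnP_ne_nil _ _)
        · simp [List.modifyHead]

theorem pv_splitOn_bridge (cs : List Char) (c : Char) :
    PySem.Chars.splitOn cs [c] = cs.splitOn c := by
  rw [show PySem.Chars.splitOn cs [c] = PySem.Chars.splitOn.go [c] (cs.length + 1) cs [] [] from rfl]
  rw [pv_go_spec c (cs.length + 1) cs [] [] (by omega)]
  rcases hsp : cs.splitOn c with - | ⟨h0, t0⟩
  · exact absurd hsp (by simp [List.splitOn]; exact List.splitOnP_ne_nil _ _)
  · simp [List.modifyHead]

theorem pv_splitOn_not_mem (c : Char) (cs : List Char) : ∀ l ∈ cs.splitOn c, c ∉ l := by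
  induction cs with
  | nil => simp [List.splitOn, List.splitOnP_nil]
  | cons x rest ih =>
    simp only [List.splitOn] at *
    rw [List.splitOnP_cons]
    by_cases hx : x = c
    · subst hx
      simp only [beq_self_eq_true, if_true]
      intro l hl
      rcases List.mem_cons.mp hl with hl | hl
      · simp [hl]
      · exact ih l hl
    · have hbeq : (x == c) = false := by simpa using hx
      rw [hbeq]
      simp only [Bool.false_eq_true, if_false]
      rcases hsp : List.splitOnP (fun y => y == c) rest with - | ⟨h0, t0⟩
      · exact absurd hsp (List.splitOnP_ne_nil _ _)
      · rw [hsp] at ih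
        intro l hl
        simp only [List.modifyHead] at hl
        rcases List.mem_cons.mp hl with hl | hl
        · subst hl
          intro hc
          rcases List.mem_cons.mp hc with hc | hc
          · exact hx hc.symm
          · exact ih h0 (List.mem_cons_self ..) hc
        · exact ih l (List.mem_cons_of_mem _ hl)

-- find: shift of the running index
theorem pv_go_shift (sub : List Char) : ∀ (l : List Char) (k : Nat),
    PySem.Chars.find.go sub l k
      = if PySem.Chars.find.go sub l 0 = -1 then -1 else PySem.Chars.find.go sub l 0 + k := by
  intro l
  induction l with
  | nil =>
    intro k
    by_cases hs : sub.isEmpty <;> simp [PySem.Chars.find.go, hs]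
  | cons x t ih =>
    intro k
    by_cases hp : List.isPrefixOf sub (x :: t)
    · simp [PySem.Chars.find.go, hp]
    · rw [show PySem.Chars.find.go sub (x :: t) k = PySem.Chars.find.go sub t (k + 1) by
        simp [PySem.Chars.find.go, hp]]
      rw [show PySem.Chars.find.go sub (x :: t) 0 = PySem.Chars.find.go sub t (0 + 1) by
        simp [PySem.Chars.find.go, hp]]
      rw [ih (k + 1), ih (0 + 1)]
      by_cases h0 : PySem.Chars.find.go sub t 0 = -1
      · simp [h0]
      · have hge : -1 ≤ PySem.Chars.find.go sub t 0 := by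
          have := PySem.Chars.neg_one_le_find t sub
          simpa [PySem.Chars.find] using this
        have : ¬ (PySem.Chars.find.go sub t 0 + (0 + 1) = -1) := by omega
        simp only [h0, if_false]
        push_cast
        omega

theorem pv_find_cons (x : Char) (l sub : List Char) :
    PySem.Chars.find (x :: l) sub
      = if List.isPrefixOf sub (x :: l) then 0
        else if PySem.Chars.find l sub = -1 then -1 else PySem.Chars.find l sub + 1 := by
  by_cases hp : List.isPrefixOf sub (x :: l)
  · simp [PySem.Chars.find, PySem.Chars.find.go, hp]
  · rw [show PySem.Chars.find (x :: l) sub = PySem.Chars.find.go sub l (0 + 1) by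
      simp [PySem.Chars.find, PySem.Chars.find.go, hp]]
    rw [pv_go_shift sub l (0 + 1)]
    simp [PySem.Chars.find, hp]

-- a needle starting with c does not occur in a c-free haystack
theorem pv_find_free (c : Char) (key : List Char) : ∀ (l : List Char), c ∉ l →
    PySem.Chars.find l (c :: key) = -1 := by
  intro l
  induction l with
  | nil => simp [PySem.Chars.find, PySem.Chars.find.go]
  | cons x t ih =>
    intro h
    have hx : c ≠ x := fun hc => h (by simp [hc])
    have hpre : List.isPrefixOf (c :: key) (x :: t) = false := by
      simp [List.isPrefixOf]
      exact fun hcx => absurd hcx hx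
    rw [pv_find_cons, hpre, ih (fun hm => h (by simp [hm]))]
    simp

-- prefix test ignores everything from the first separator on
theorem pv_prefix_append (c : Char) : ∀ (key l0 z : List Char), c ∉ key → c ∉ l0 →
    List.isPrefixOf key (l0 ++ c :: z) = List.isPrefixOf key l0 := by
  intro key
  induction key with
  | nil => simp [List.isPrefixOf]
  | cons k ks ih =>
    intro l0 z hk h0
    cases l0 with
    | nil =>
      have : k ≠ c := fun h => hk (by simp [h])
      simp [List.isPrefixOf]
      exact fun hkc => absurd hkc this
    | cons a as =>
      simp only [List.cons_append, List.isPrefixOf]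
      rw [ih as z (fun hm => hk (by simp [hm])) (fun hm => h0 (by simp [hm]))]

-- first occurrence of '\n' ++ key in l0 ++ '\n' :: z, for '\n'-free l0
theorem pv_find_sep (c : Char) (key z : List Char) : ∀ (l0 : List Char), c ∉ l0 →
    PySem.Chars.find (l0 ++ c :: z) (c :: key)
      = if List.isPrefixOf key z then (l0.length : Int)
        else if PySem.Chars.find z (c :: key) = -1 then -1
        else (l0.length : Int) + 1 + PySem.Chars.find z (c :: key) := by
  intro l0
  induction l0 with
  | nil =>
    intro _
    rw [List.nil_append, pv_find_cons]
    have : List.isPrefixOf (c :: key) (c :: z) = List.isPrefixOf key z := by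
      simp [List.isPrefixOf]
    rw [this]
    by_cases hkz : List.isPrefixOf key z
    · simp [hkz]
    · simp only [hkz, Bool.false_eq_true, if_false, List.length_nil]
      by_cases hf : PySem.Chars.find z (c :: key) = -1
      · simp [hf]
      · simp only [hf, if_false]
        push_cast
        omega
  | cons x t ih =>
    intro h
    have hx : c ≠ x := fun hc => h (by simp [hc])
    have hpre : List.isPrefixOf (c :: key) (x :: (t ++ c :: z)) = false := by
      simp [List.isPrefixOf]
      exact fun hcx => absurd hcx hx
    rw [List.cons_append, pv_find_cons, hpre]
    rw [ih (fun hm => h (by simp [hm]))]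
    have hge : -1 ≤ PySem.Chars.find z (c :: key) := PySem.Chars.neg_one_le_find z (c :: key)
    by_cases hkz : List.isPrefixOf key z
    · simp only [hkz, if_true, Bool.false_eq_true, if_false]
      have : ((t.length : Int)) ≠ -1 := by omega
      simp only [this, if_false, List.length_cons]
      push_cast
      omega
    · simp only [hkz, Bool.false_eq_true, if_false]
      by_cases hf : PySem.Chars.find z (c :: key) = -1
      · simp [hf]
      · have h1 : ¬ ((t.length : Int) + 1 + PySem.Chars.find z (c :: key) = -1) := by omega
        simp only [hf, if_false, h1, List.length_cons]
        push_cast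
        omega

-- the tail of pvTry (everything after pos is fixed), factored for the proofs
def pvRest (cs lic : List Char) (pos : Int) : List Char :=
  let nl := PySem.Chars.findFrom cs ['\n'] pos
  if nl < 0 then cs ++ '\n' :: lic
  else PySem.Chars.slice cs none (some nl) ++ '\n' :: lic ++ PySem.Chars.slice cs (some nl) none

theorem pv_pvTry_eq (cs key lic : List Char) :
    pvTry cs key lic
      = if PySem.Chars.startswith cs key then some (pvRest cs lic 0)
        else if PySem.Chars.find cs ('\n' :: key) < 0 then none
        else some (pvRest cs lic (PySem.Chars.find cs ('\n' :: key) + 1)) := by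
  unfold pvTry pvRest
  by_cases h1 : PySem.Chars.startswith cs key
  · simp only [h1, if_true]
    split <;> rfl
  · simp only [h1, Bool.false_eq_true, if_false]
    by_cases h2 : PySem.Chars.find cs ('\n' :: key) < 0
    · simp [h2]
    · simp only [h2, if_false]
      split <;> rfl

theorem pv_take_add (a b : List Char) (n : Nat) : (a ++ b).take (a.length + n) = a ++ b.take n := by
  rw [List.take_append]
  simp [List.take_of_length_le (Nat.le_add_right _ _)]

theorem pv_drop_add (a b : List Char) (n : Nat) : (a ++ b).drop (a.length + n) = b.drop n := by
  rw [List.drop_append]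
  simp [List.drop_of_length_le (Nat.le_add_right _ _)]

-- pvRest at a position past the first line peels that line off
theorem pv_rest_step (l0 z lic : List Char) (k : Nat) (hk : k ≤ z.length) :
    pvRest (l0 ++ '\n' :: z) lic ((l0.length + 1 + k : Nat) : Int)
      = l0 ++ '\n' :: pvRest z lic ((k : Nat) : Int) := by
  have hlen : l0.length + 1 + k ≤ (l0 ++ '\n' :: z).length := by
    simp [List.length_append]
    omega
  have hdrop : (l0 ++ '\n' :: z).drop (l0.length + 1 + k) = z.drop k := by
    rw [show l0 ++ '\n' :: z = (l0 ++ ['\n']) ++ z by simp]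
    rw [show l0.length + 1 + k = (l0 ++ ['\n']).length + k by simp]
    exact pv_drop_add _ _ _
  unfold pvRest
  rw [PySem.Chars.findFrom_natCast _ _ _ hlen, PySem.Chars.findFrom_natCast _ _ _ hk, hdrop]
  by_cases hf : PySem.Chars.find (z.drop k) ['\n'] = -1
  · simp [hf]
  · have hge : -1 ≤ PySem.Chars.find (z.drop k) ['\n'] := PySem.Chars.neg_one_le_find _ _
    have h0 : 0 ≤ PySem.Chars.find (z.drop k) ['\n'] := by omega
    set r := PySem.Chars.find (z.drop k) ['\n'] with hr
    have hrn : r = ((r.toNat : Nat) : Int) := by omega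
    have h1 : ¬ ((l0.length + 1 + k : Nat) : Int) + r < 0 := by push_cast; omega
    have h2 : ¬ ((k : Nat) : Int) + r < 0 := by omega
    simp only [hf, if_false, h1, h2]
    have hle : PySem.Chars.find (z.drop k) ['\n'] ≤ ((z.drop k).length : Int) :=
      PySem.Chars.find_le_length _ _
    have e1 : ((l0.length + 1 + k : Nat) : Int) + r = (((l0.length + 1 + (k + r.toNat) : Nat)) : Int) := by
      push_cast; omega
    have e2 : ((k : Nat) : Int) + r = (((k + r.toNat : Nat)) : Int) := by push_cast; omega
    rw [e1, e2]
    simp only [PySem.Chars.slice_eq_listSlice, PySem.List.slice_to_natCast, PySem.List.slice_from_natCast]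
    have htake : (l0 ++ '\n' :: z).take (l0.length + 1 + (k + r.toNat))
        = l0 ++ '\n' :: z.take (k + r.toNat) := by
      rw [show l0 ++ '\n' :: z = (l0 ++ ['\n']) ++ z by simp]
      rw [show l0.length + 1 + (k + r.toNat) = (l0 ++ ['\n']).length + (k + r.toNat) by simp]
      rw [pv_take_add]
      simp
    have hdrop2 : (l0 ++ '\n' :: z).drop (l0.length + 1 + (k + r.toNat)) = z.drop (k + r.toNat) := by
      rw [show l0 ++ '\n' :: z = (l0 ++ ['\n']) ++ z by simp]
      rw [show l0.length + 1 + (k + r.toNat) = (l0 ++ ['\n']).length + (k + r.toNat) by simp]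
      exact pv_drop_add _ _ _
    rw [htake, hdrop2]
    simp

-- pvTry on a single '\n'-free line
theorem pv_try_single (l0 key lic : List Char) (h0 : '\n' ∉ l0) :
    pvTry l0 key lic
      = if List.isPrefixOf key l0 then some (l0 ++ '\n' :: lic) else none := by
  rw [pv_pvTry_eq]
  by_cases hp : List.isPrefixOf key l0
  · have hs : PySem.Chars.startswith l0 key = true := hp
    simp only [hs, if_true, hp, if_true]
    unfold pvRest
    rw [PySem.Chars.findFrom_zero, pv_find_free '\n' [] l0 h0]
    norm_num
  · have hs : PySem.Chars.startswith l0 key = false := by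
      rw [show PySem.Chars.startswith l0 key = List.isPrefixOf key l0 from rfl,
        Bool.eq_false_iff]
      simpa using hp
    simp only [hs, Bool.false_eq_true, if_false, hp, if_false]
    rw [pv_find_free '\n' key l0 h0]
    norm_num

-- pvTry when the first line matches: insert right after it
theorem pv_try_head (l0 z key lic : List Char) (h0 : '\n' ∉ l0) (hk : '\n' ∉ key)
    (hp : List.isPrefixOf key l0) :
    pvTry (l0 ++ '\n' :: z) key lic = some (l0 ++ '\n' :: lic ++ '\n' :: z) := by
  rw [pv_pvTry_eq]
  have hs : PySem.Chars.startswith (l0 ++ '\n' :: z) key = true := by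
    show List.isPrefixOf key (l0 ++ '\n' :: z) = true
    rw [pv_prefix_append '\n' key l0 z hk h0]
    exact hp
  simp only [hs, if_true]
  unfold pvRest
  rw [PySem.Chars.findFrom_zero, pv_find_sep '\n' [] z l0 h0]
  have hpz : List.isPrefixOf ([] : List Char) z = true := by cases z <;> rfl
  rw [hpz, if_pos rfl]
  have h1 : ¬ ((l0.length : Int) < 0) := by omega
  rw [if_neg h1]
  simp only [PySem.Chars.slice_eq_listSlice, PySem.List.slice_to_natCast, PySem.List.slice_from_natCast]
  rw [List.take_left, List.drop_left]

-- pvTry when the first line does not match: peel it off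
theorem pv_try_step (l0 z key lic : List Char) (h0 : '\n' ∉ l0) (hk : '\n' ∉ key)
    (hp : ¬ List.isPrefixOf key l0) :
    pvTry (l0 ++ '\n' :: z) key lic = (pvTry z key lic).map (fun r => l0 ++ '\n' :: r) := by
  rw [pv_pvTry_eq, pv_pvTry_eq]
  have hs : PySem.Chars.startswith (l0 ++ '\n' :: z) key = false := by
    show List.isPrefixOf key (l0 ++ '\n' :: z) = false
    rw [pv_prefix_append '\n' key l0 z hk h0, Bool.eq_false_iff]
    simpa using hp
  have hs2 : PySem.Chars.startswith z key = List.isPrefixOf key z := rfl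
  rw [pv_find_sep '\n' key z l0 h0]
  simp only [hs, Bool.false_eq_true, if_false, hs2]
  by_cases hkz : List.isPrefixOf key z
  · simp only [hkz, if_true]
    have h1 : ¬ ((l0.length : Int)) < 0 := by omega
    simp only [h1, if_false]
    have e : (l0.length : Int) + 1 = ((l0.length + 1 + 0 : Nat) : Int) := by push_cast; omega
    rw [e, pv_rest_step l0 z lic 0 (Nat.zero_le _)]
    rw [show (((0 : Nat)) : Int) = (0 : Int) by norm_num]
    rfl
  · simp only [hkz, Bool.false_eq_true, if_false]
    by_cases hf : PySem.Chars.find z ('\n' :: key) = -1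
    · simp [hf]
    · have hge : -1 ≤ PySem.Chars.find z ('\n' :: key) := PySem.Chars.neg_one_le_find _ _
      have hpos : 0 ≤ PySem.Chars.find z ('\n' :: key) := by omega
      set j := PySem.Chars.find z ('\n' :: key) with hj
      have hjlt : j.toNat < z.length := by
        have hsp := PySem.Chars.find_spec (s := z) (sub := '\n' :: key) hpos
        have hpre := hsp.1
        have hne2 : z.drop j.toNat ≠ [] := by
          intro hnil
          rw [hnil] at hpre
          exact absurd (List.prefix_nil.mp hpre) (by simp)
        by_contra hge'
        exact hne2 (List.drop_eq_nil_of_le (by omega))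
      have h1 : ¬ ((l0.length : Int) + 1 + j < 0) := by omega
      have h2 : ¬ (j < 0) := by omega
      rw [if_neg hf, if_neg h1, if_neg h2]
      have e1 : (l0.length : Int) + 1 + j + 1 = ((l0.length + 1 + (j.toNat + 1) : Nat) : Int) := by
        push_cast; omega
      have e2 : j + 1 = ((j.toNat + 1 : Nat) : Int) := by push_cast; omega
      rw [e1, e2, pv_rest_step l0 z lic (j.toNat + 1) (by omega)]
      rfl

-- the spliced line list after a non-matching head line
theorem pv_splice_cons (l0 r0 : List Char) (t : List (List Char)) (lic : List Char) (i : Nat) :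
    ['\n'].intercalate (List.take (i+1+1) (l0 :: r0 :: t) ++ [lic] ++ List.drop (i+1+1) (l0 :: r0 :: t))
      = l0 ++ '\n' :: ['\n'].intercalate (List.take (i+1) (r0 :: t) ++ [lic] ++ List.drop (i+1) (r0 :: t)) := by
  rw [show List.take (i+1+1) (l0 :: r0 :: t) = l0 :: List.take (i+1) (r0 :: t) from rfl]
  rw [show List.drop (i+1+1) (l0 :: r0 :: t) = List.drop (i+1) (r0 :: t) from rfl]
  rw [show (l0 :: List.take (i+1) (r0 :: t)) ++ [lic] ++ List.drop (i+1) (r0 :: t)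
      = l0 :: (List.take (i+1) (r0 :: t) ++ [lic] ++ List.drop (i+1) (r0 :: t)) by simp]
  rcases hsp : List.take (i+1) (r0 :: t) ++ [lic] ++ List.drop (i+1) (r0 :: t) with - | ⟨b, u⟩
  · simp at hsp
  · rw [pv_intercalate_cons₂]

-- B characterised on the line decomposition
theorem pv_try_lines (key lic : List Char) (hk : '\n' ∉ key) (hne : key ≠ []) :
    ∀ (lines : List (List Char)), (∀ l ∈ lines, '\n' ∉ l) →
    pvTry (['\n'].intercalate lines) key lic
      = (lines.findIdx? (fun l => PySem.Chars.startswith l key)).map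
          (fun i => ['\n'].intercalate (lines.take (i + 1) ++ [lic] ++ lines.drop (i + 1))) := by
  intro lines
  induction lines with
  | nil =>
    intro _
    rw [pv_intercalate_nil]
    have hs : PySem.Chars.startswith ([] : List Char) key = false := by
      show List.isPrefixOf key [] = false
      cases key with
      | nil => exact absurd rfl hne
      | cons a b => rfl
    rw [pv_pvTry_eq, hs]
    have : PySem.Chars.find [] ('\n' :: key) = -1 := by
      simp [PySem.Chars.find, PySem.Chars.find.go]
    simp [this]
  | cons l0 rest ih =>
    intro hmem
    have h0 : '\n' ∉ l0 := hmem l0 (by simp)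
    cases rest with
    | nil =>
      rw [pv_intercalate_singleton, pv_try_single l0 key lic h0]
      rw [List.findIdx?_cons]
      by_cases hp : List.isPrefixOf key l0
      · have : PySem.Chars.startswith l0 key = true := hp
        simp only [this, if_true, hp, if_true, Option.map_some]
        rw [show ([l0].take 1 ++ [lic] ++ [l0].drop 1) = [l0, lic] by rfl]
        rw [pv_intercalate_cons₂, pv_intercalate_singleton]
      · have hs : PySem.Chars.startswith l0 key = false := by
          rw [show PySem.Chars.startswith l0 key = List.isPrefixOf key l0 from rfl,
            Bool.eq_false_iff]
          simpa using hp
        simp [hs, hp]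
    | cons r0 rest' =>
      rw [pv_intercalate_cons₂]
      rw [List.findIdx?_cons]
      by_cases hp : List.isPrefixOf key l0
      · have hs : PySem.Chars.startswith l0 key = true := hp
        rw [pv_try_head l0 _ key lic h0 hk hp]
        simp only [hs, if_true, Option.map_some]
        rw [show ((l0 :: r0 :: rest').take 1 ++ [lic] ++ (l0 :: r0 :: rest').drop 1)
            = l0 :: lic :: r0 :: rest' by rfl]
        rw [pv_intercalate_cons₂ '\n' l0 lic (r0 :: rest'), pv_intercalate_cons₂ '\n' lic r0 rest']
        simp
      · have hs : PySem.Chars.startswith l0 key = false := by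
          rw [show PySem.Chars.startswith l0 key = List.isPrefixOf key l0 from rfl,
            Bool.eq_false_iff]
          simpa using hp
        rw [pv_try_step l0 _ key lic h0 hk hp]
        rw [ih (fun l hl => hmem l (by simp [hl]))]
        simp only [hs, Bool.false_eq_true, if_false, Option.map_map]
        rcases hidx : (r0 :: rest').findIdx? (fun l => PySem.Chars.startswith l key) with - | i
        · rfl
        · simp only [Option.map_some, Function.comp]
          rw [pv_splice_cons]

-- appending the last-resort line commutes with intercalate on a nonempty list
theorem pv_intercalate_append_last (lic : List Char) :
    ∀ (l0 : List Char) (rest : List (List Char)),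
    ['\n'].intercalate ((l0 :: rest) ++ [lic]) = ['\n'].intercalate (l0 :: rest) ++ '\n' :: lic := by
  intro l0 rest
  induction rest generalizing l0 with
  | nil =>
    rw [show (([l0] : List (List Char)) ++ [lic]) = [l0, lic] by rfl]
    rw [pv_intercalate_cons₂, pv_intercalate_singleton, pv_intercalate_singleton]
  | cons r t ih =>
    rw [show ((l0 :: r :: t) ++ [lic]) = l0 :: ((r :: t) ++ [lic]) by rfl]
    rw [show ((r :: t) ++ [lic]) = r :: (t ++ [lic]) by rfl]
    have := ih r
    rw [show (r :: t ++ [lic]) = r :: (t ++ [lic]) by rfl] at this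
    rw [pv_intercalate_cons₂ '\n' l0 r (t ++ [lic]), this, pv_intercalate_cons₂]
    simp

-- A's flagged pass copies the rest once the flag is set
theorem pvPass_true (pref lic : List Char) (ls : List (List Char)) :
    pvPass pref lic ls true = (ls, true) := by
  induction ls with
  | nil => rfl
  | cons l ls ih =>
    simp only [pvPass, Bool.not_true, Bool.and_false, Bool.false_eq_true, if_false, ih]

-- characterisation of A's flagged pass by the first-match index
theorem pvPass_eq (pref lic : List Char) (ls : List (List Char)) :
    pvPass pref lic ls false =
      match ls.findIdx? (fun l => PySem.Chars.startswith l pref) with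
      | some i => (ls.take (i + 1) ++ [lic] ++ ls.drop (i + 1), true)
      | none => (ls, false) := by
  induction ls with
  | nil => rfl
  | cons l ls ih =>
    rw [List.findIdx?_cons]
    by_cases h : PySem.Chars.startswith l pref
    · simp only [pvPass, h, Bool.not_false, Bool.and_true, if_true, pvPass_true,
        List.take_succ_cons, List.take_zero, List.drop_succ_cons, List.drop_zero]
      rfl
    · rw [Bool.not_eq_true] at h
      simp only [pvPass, h, Bool.false_and, Bool.false_eq_true, if_false, ih]
      cases hf : ls.findIdx? (fun l => PySem.Chars.startswith l pref) with
      | none => rfl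
      | some i =>
        simp only [Option.map_some, List.take_succ_cons, List.drop_succ_cons,
          List.cons_append]

-- the two char-level programs agree
theorem pv_core (cs lic : List Char) : pvAddA cs lic = pvAddB cs lic := by
  have hsplit : (PySem.Chars.split? cs ['\n']).getD [] = cs.splitOn '\n' := by
    simp [PySem.Chars.split?, pv_splitOn_bridge]
  simp only [pvAddA, pvAddB]
  rw [hsplit]
  rcases hsp : cs.splitOn '\n' with - | ⟨h0, t0⟩
  · exact absurd hsp (by simp [List.splitOn]; exact List.splitOnP_ne_nil _ _)
  have hmem : ∀ l ∈ h0 :: t0, '\n' ∉ l := by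
    rw [← hsp]; exact pv_splitOn_not_mem '\n' cs
  have hcs : cs = ['\n'].intercalate (h0 :: t0) := by
    rw [← hsp, List.intercalate_splitOn]
  have hv := pv_try_lines "version:".toList lic (by decide) (by decide) (h0 :: t0) hmem
  have hd := pv_try_lines "description:".toList lic (by decide) (by decide) (h0 :: t0) hmem
  rw [← hcs] at hv hd
  rw [pvPass_eq, pvPass_eq, hv, hd]
  rcases hfv : (h0 :: t0).findIdx? (fun l => PySem.Chars.startswith l "version:".toList) with - | i
  · rcases hfd : (h0 :: t0).findIdx? (fun l => PySem.Chars.startswith l "description:".toList) with - | j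
    · simp only [Option.map_none]
      show PySem.Chars.join ['\n'] ((h0 :: t0) ++ [lic]) = cs ++ '\n' :: lic
      show ['\n'].intercalate ((h0 :: t0) ++ [lic]) = cs ++ '\n' :: lic
      rw [pv_intercalate_append_last, ← hcs]
    · simp only [Option.map_some]
      rfl
  · simp only [Option.map_some]
    rfl

-- ===== VERDICT (by name: the statement is the Claim_ definition above) =====
theorem add_license_field_spec : Claim_equal_add_license_field := by
  intro fm lid _
  unfold Spec_add_license_field add_license_field add_license_field_alt
  rw [pv_core]
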